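-- pv_equiv track=rewrite | github.com/GuyCarver/MyUtils | MyUtils.py | LineWidth
-- ===== SOURCE A (Python) =====
-- def LineWidth( aComment, aTabSize, aLine ) :
--   '''Convert \t (tabs) into spaces for string length counting.
--      return char pos and column'''
--   ln = 0
--   cs = 0
--   for ch in aLine :
--     cs += 1
--     if ch == '\t' :
--       ln += aTabSize
--       ln -= ln % aTabSize
--     else:
--       ln += 1
--
--   return cs, ln
-- ===== SOURCE B (Python) =====
-- def LineWidth( aComment, aTabSize, aLine ) :
--   '''Convert \t (tabs) into spaces for string length counting.
--      return char pos and column'''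
--   segs = aLine.split('\t')
--   ln = len(segs[0])
--   for s in segs[1:]:
--     ln += aTabSize
--     ln -= ln % aTabSize
--     ln += len(s)
--   return len(aLine), ln
-- ===== Notes on version B (the rewrite author's own statement) =====
-- stated objective: alternative
-- what changed: B splits the line once on tab (C-level str.split/len) and folds over the tab-delimited segments, one tab-stop advance per boundary plus the segment length, instead of A's per-character Python loop with a branch on every character.
import Mathlib
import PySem

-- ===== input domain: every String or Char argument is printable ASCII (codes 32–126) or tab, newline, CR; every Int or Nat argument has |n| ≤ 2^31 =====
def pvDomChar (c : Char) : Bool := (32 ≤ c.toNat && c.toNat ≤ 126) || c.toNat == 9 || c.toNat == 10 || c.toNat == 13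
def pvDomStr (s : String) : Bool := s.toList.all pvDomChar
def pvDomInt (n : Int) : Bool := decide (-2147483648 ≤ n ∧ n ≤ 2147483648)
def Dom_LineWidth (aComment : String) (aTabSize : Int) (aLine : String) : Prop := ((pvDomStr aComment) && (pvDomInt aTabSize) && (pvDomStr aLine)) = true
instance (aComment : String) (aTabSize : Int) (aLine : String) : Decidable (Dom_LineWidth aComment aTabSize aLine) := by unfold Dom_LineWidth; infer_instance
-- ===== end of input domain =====

-- B splits the line once on '\t' and folds over the segments (one tab-stop advance per
-- boundary, same round-up formula as A) instead of A's per-character loop; same cost class.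


-- ===== PORT A =====
-- A: one pass over the characters; each tab advances ln to the next tab stop
-- (ln += aTabSize; ln -= ln % aTabSize, Python's floor mod = PySem.Int.mod).
def LineWidth (aComment : String) (aTabSize : Int) (aLine : String) : Int × Int :=
  let st := aLine.toList.foldl
    (fun (p : Int × Int) ch =>
      let cs := p.1 + 1
      if ch = '\t' then
        let ln := p.2 + aTabSize
        (cs, ln - PySem.Int.mod ln aTabSize)
      else
        (cs, p.2 + 1))
    (0, 0)
  (st.1, st.2)

-- ===== PORT B =====
-- Source B's aLine.split('\t') (single-char separator), transliterated structurally: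
-- returns (first segment, remaining segments).
def pvSplitTab : List Char → List Char × List (List Char)
  | [] => ([], [])
  | c :: r =>
    let p := pvSplitTab r
    if c = '\t' then ([], p.1 :: p.2) else (c :: p.1, p.2)

def LineWidth_alt (aComment : String) (aTabSize : Int) (aLine : String) : Int × Int :=
  let segs := pvSplitTab aLine.toList
  let ln := segs.2.foldl
    (fun (ln : Int) (s : List Char) =>
      let l := ln + aTabSize
      (l - PySem.Int.mod l aTabSize) + (s.length : Int))
    ((segs.1.length : Int))
  ((aLine.toList.length : Int), ln)

-- ===== PRECONDITION & SPEC =====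
-- Pre_ excludes exactly the inputs where Python A raises ZeroDivisionError:
-- aTabSize = 0 with a tab in the line (B raises there too).
def Pre_LineWidth (aComment : String) (aTabSize : Int) (aLine : String) : Prop :=
  '\t' ∈ aLine.toList → aTabSize ≠ 0
instance (aComment : String) (aTabSize : Int) (aLine : String) : Decidable (Pre_LineWidth aComment aTabSize aLine) := by unfold Pre_LineWidth; infer_instance

def pvWitness_LineWidth : String × Int × String := ("", 4, "ab\tc")

def Spec_LineWidth (aComment : String) (aTabSize : Int) (aLine : String) (out : Int × Int) : Prop := out = LineWidth_alt aComment aTabSize aLine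
instance (aComment : String) (aTabSize : Int) (aLine : String) (out : Int × Int) : Decidable (Spec_LineWidth aComment aTabSize aLine out) := by unfold Spec_LineWidth; infer_instance

-- ===== CLAIM (what is proved, stated in full; the proofs are below) =====
def Claim_equal_LineWidth : Prop := ∀ (aComment : String) (aTabSize : Int) (aLine : String), Dom_LineWidth aComment aTabSize aLine → Pre_LineWidth aComment aTabSize aLine → Spec_LineWidth aComment aTabSize aLine (LineWidth aComment aTabSize aLine)

-- ===== LEMMAS AND PROOFS =====
-- The per-character loop equals the per-segment fold, for any starting counters.
theorem pv_loop_eq (ts : Int) (cs : List Char) (c0 ln : Int) :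
    cs.foldl
      (fun (p : Int × Int) ch =>
        let c := p.1 + 1
        if ch = '\t' then
          let l := p.2 + ts
          (c, l - PySem.Int.mod l ts)
        else
          (c, p.2 + 1))
      (c0, ln)
    = (c0 + (cs.length : Int),
       (pvSplitTab cs).2.foldl
         (fun (l : Int) (s : List Char) =>
           let l' := l + ts
           (l' - PySem.Int.mod l' ts) + (s.length : Int))
         (ln + ((pvSplitTab cs).1.length : Int))) := by
  induction cs generalizing c0 ln with
  | nil => simp [pvSplitTab]
  | cons c r ih =>
    by_cases h : c = '\t'
    · subst h
      simp only [List.foldl_cons, pvSplitTab, if_true, List.length_cons]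
      rw [ih]
      simp only [List.length_nil, Nat.cast_zero, add_zero, Prod.mk.injEq]
      refine ⟨by push_cast; ring, ?_⟩
      trivial
    · simp only [List.foldl_cons, pvSplitTab, if_neg h, List.length_cons]
      rw [ih]
      simp only [Prod.mk.injEq]
      refine ⟨by push_cast; ring, ?_⟩
      congr 1
      push_cast; ring

-- ===== VERDICT (by name: the statement is the Claim_ definition above) =====
theorem LineWidth_spec : Claim_equal_LineWidth := by
  intro aComment aTabSize aLine _ _
  unfold Spec_LineWidth LineWidth LineWidth_alt
  simp only [pv_loop_eq aTabSize aLine.toList 0 0, zero_add]
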